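-- pv_equiv track=rewrite | github.com/parc-nsi/PCSI | TP11/corrige/I1-TP-11-Gauss-corrige.py | virginie1
-- ===== SOURCE A (Python) =====
-- def virginie1(n):
--     """Retourne une matrice de Virginie de dimensions  nxn"""
--     assert str(type(n))=="<class 'int'>" and n>=2,"n doit etre un entier >=2"
--     V = []
--     for i in range(n):
--         ligne = []
--         for j in range(n):
--             if j < i-1 or j > i+1:
--                 ligne.append(0)
--             elif j == i-1 or j == i+1:
--                 ligne.append(-1)
--             else:
--                 ligne.append(2)
--         V.append(ligne)
--     return V
-- ===== SOURCE B (Python) =====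
-- def virginie1(n):
--     """Retourne une matrice de Virginie de dimensions  nxn"""
--     assert str(type(n))=="<class 'int'>" and n>=2,"n doit etre un entier >=2"
--     rows = [[2, -1] + [0]*(n-2)]
--     for i in range(1, n-1):
--         rows.append([0]*(i-1) + [-1, 2, -1] + [0]*(n-i-2))
--     rows.append([0]*(n-2) + [-1, 2])
--     return rows
-- ===== Notes on version B (the rewrite author's own statement) =====
-- stated objective: simpler
-- what changed: B constructs each row directly as zero-block ++ (-1,2,-1) band ++ zero-block (with explicit first/last rows), instead of A's nested loop classifying every (i,j) cell with a conditional chain.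
import Mathlib
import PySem

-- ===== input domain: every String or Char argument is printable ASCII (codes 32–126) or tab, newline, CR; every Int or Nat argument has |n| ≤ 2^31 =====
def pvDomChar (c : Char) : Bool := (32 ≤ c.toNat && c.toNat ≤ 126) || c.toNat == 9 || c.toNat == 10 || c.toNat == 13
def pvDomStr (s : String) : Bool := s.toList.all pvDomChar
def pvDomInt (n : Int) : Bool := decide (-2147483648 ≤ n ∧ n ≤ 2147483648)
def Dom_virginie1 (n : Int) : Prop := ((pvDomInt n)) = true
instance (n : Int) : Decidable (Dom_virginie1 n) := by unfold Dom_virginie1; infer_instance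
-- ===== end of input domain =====

-- B builds each row directly as a concatenation of zero blocks around the (-1,2,-1) band
-- instead of classifying every (i,j) cell with nested conditionals (objective: simpler).

-- ===== PORT A =====
-- per-cell classification, appending cell by cell and row by row
def virginie1 (n : Int) : List (List Int) :=
  (PySem.List.pyRange 0 n 1).foldl (fun V i =>
    V ++ [(PySem.List.pyRange 0 n 1).foldl (fun ligne j =>
      ligne ++ [if j < i - 1 ∨ j > i + 1 then (0 : Int)
                else if j = i - 1 ∨ j = i + 1 then -1 else 2]) []]) []

-- ===== PORT B =====
-- first row, then the interior rows as zero-block / band / zero-block, then the last row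
def virginie1_alt (n : Int) : List (List Int) :=
  let first : List Int := [2, -1] ++ List.replicate (n - 2).toNat 0
  let mid := (PySem.List.pyRange 1 (n - 1) 1).foldl (fun rows i =>
      rows ++ [List.replicate (i - 1).toNat 0 ++ [-1, 2, -1] ++
               List.replicate (n - i - 2).toNat 0]) [first]
  mid ++ [List.replicate (n - 2).toNat 0 ++ [-1, 2]]

-- ===== PRECONDITION & SPEC =====
-- A's assert raises AssertionError for n < 2; exactly those inputs are excluded (B asserts too).
def Pre_virginie1 (n : Int) : Prop := 2 ≤ n
instance (n : Int) : Decidable (Pre_virginie1 n) := by unfold Pre_virginie1; infer_instance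
def pvWitness_virginie1 : Int := (4)

def Spec_virginie1 (n : Int) (out : List (List Int)) : Prop := out = virginie1_alt n
instance (n : Int) (out : List (List Int)) : Decidable (Spec_virginie1 n out) := by unfold Spec_virginie1; infer_instance

-- ===== CLAIM (what is proved, stated in full; the proofs are below) =====
def Claim_equal_virginie1 : Prop := ∀ (n : Int), Dom_virginie1 n → Pre_virginie1 n → Spec_virginie1 n (virginie1 n)

-- ===== LEMMAS AND PROOFS =====

-- A's row i, as a map over the column range
def pvRowA (n i : Int) : List Int :=
  (PySem.List.pyRange 0 n 1).map (fun j =>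
    if j < i - 1 ∨ j > i + 1 then (0 : Int)
    else if j = i - 1 ∨ j = i + 1 then -1 else 2)

lemma pvRowA_first (n : Int) (hn : 2 ≤ n) :
    pvRowA n 0 = [2, -1] ++ List.replicate (n - 2).toNat 0 := by
  apply List.ext_getElem
  · simp [pvRowA, PySem.List.length_pyRange_one]; omega
  · intro k hk1 hk2
    have hk' : (k : Int) < n := by
      simp [pvRowA, PySem.List.length_pyRange_one] at hk1; omega
    simp only [pvRowA, List.getElem_map, PySem.List.getElem_pyRange_one, zero_add]
    by_cases hc : k < 2
    · rw [List.getElem_append_left (by simpa using hc)]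
      interval_cases k <;> norm_num
    · rw [List.getElem_append_right (by simpa using hc)]
      simp only [List.getElem_replicate, List.length_cons, List.length_nil]
      split_ifs with h1 h2 <;> [rfl; omega; omega]

lemma pvRowA_last (n : Int) (hn : 2 ≤ n) :
    pvRowA n (n - 1) = List.replicate (n - 2).toNat 0 ++ [-1, 2] := by
  apply List.ext_getElem
  · simp [pvRowA, PySem.List.length_pyRange_one]; omega
  · intro k hk1 hk2
    have hk' : (k : Int) < n := by
      simp [pvRowA, PySem.List.length_pyRange_one] at hk1; omega
    simp only [pvRowA, List.getElem_map, PySem.List.getElem_pyRange_one, zero_add]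
    by_cases hc : k < (n - 2).toNat
    · rw [List.getElem_append_left (by simpa using hc)]
      simp only [List.getElem_replicate]
      split_ifs with h1 h2 <;> [rfl; omega; omega]
    · rw [List.getElem_append_right (by simpa using hc)]
      simp only [List.length_replicate]
      rcases (by omega : k - (n - 2).toNat = 0 ∨ k - (n - 2).toNat = 1) with h0 | h0 <;>
        simp only [h0, List.getElem_cons_zero, List.getElem_cons_succ] <;>
        split_ifs with h1 h2 <;> omega

lemma pvRowA_mid (n i : Int) (h1 : 1 ≤ i) (h2 : i < n - 1) :
    pvRowA n i = List.replicate (i - 1).toNat 0 ++ [-1, 2, -1] ++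
                 List.replicate (n - i - 2).toNat 0 := by
  apply List.ext_getElem
  · simp [pvRowA, PySem.List.length_pyRange_one]; omega
  · intro k hk1 hk2
    have hk' : (k : Int) < n := by
      simp [pvRowA, PySem.List.length_pyRange_one] at hk1; omega
    simp only [pvRowA, List.getElem_map, PySem.List.getElem_pyRange_one, zero_add]
    by_cases hc : k < (i - 1).toNat + 3
    · rw [List.getElem_append_left (by simp; omega)]
      by_cases hc2 : k < (i - 1).toNat
      · rw [List.getElem_append_left (by simpa using hc2)]
        simp only [List.getElem_replicate]
        split_ifs with g1 g2 <;> [rfl; omega; omega]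
      · rw [List.getElem_append_right (by simpa using hc2)]
        simp only [List.length_replicate]
        rcases (by omega : k - (i - 1).toNat = 0 ∨ k - (i - 1).toNat = 1 ∨
            k - (i - 1).toNat = 2) with g | g | g <;>
          simp only [g, List.getElem_cons_zero, List.getElem_cons_succ] <;>
          split_ifs with g1 g2 <;> omega
    · rw [List.getElem_append_right (by simp; omega)]
      simp only [List.getElem_replicate]
      split_ifs with g1 g2 <;> [rfl; omega; omega]

-- ===== VERDICT (by name: the statement is the Claim_ definition above) =====
theorem virginie1_spec : Claim_equal_virginie1 := by
  intro n _ hn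
  have hn' : 2 ≤ n := hn
  show virginie1 n = virginie1_alt n
  have lhs : virginie1 n = (PySem.List.pyRange 0 n 1).map (fun i => pvRowA n i) := by
    unfold virginie1
    simp only [PySem.List.foldl_append_singleton_eq_map, List.nil_append]
    rfl
  have rhs : virginie1_alt n =
      [[2, -1] ++ List.replicate (n - 2).toNat 0] ++
      (PySem.List.pyRange 1 (n - 1) 1).map (fun i =>
        List.replicate (i - 1).toNat 0 ++ [-1, 2, -1] ++
        List.replicate (n - i - 2).toNat 0) ++
      [List.replicate (n - 2).toNat 0 ++ [-1, 2]] := by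
    unfold virginie1_alt
    simp only [PySem.List.foldl_append_singleton_eq_map]
  have e1 : PySem.List.pyRange 0 1 1 = [0] := by decide
  have e2 : PySem.List.pyRange 1 n 1 = PySem.List.pyRange 1 (n - 1) 1 ++ [n - 1] := by
    have h := PySem.List.pyRange_one_succ_right (a := 1) (b := n - 1) (by omega)
    simpa [show n - 1 + 1 = n by ring] using h
  have hsplit : PySem.List.pyRange 0 n 1 =
      [0] ++ PySem.List.pyRange 1 (n - 1) 1 ++ [n - 1] := by
    rw [PySem.List.pyRange_one_append (a := 0) (m := 1) (b := n) (by omega) (by omega),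
        e1, e2, List.append_assoc]
  rw [lhs, rhs, hsplit]
  simp only [List.map_append, List.map_cons, List.map_nil]
  rw [pvRowA_first n hn', pvRowA_last n hn']
  congr 1
  congr 1
  apply List.map_congr_left
  intro i hi
  rw [PySem.List.mem_pyRange_one] at hi
  exact pvRowA_mid n i hi.1 hi.2
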